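-- pv_equiv track=rewrite | github.com/Zirnworks/expiscator-discord-bot | src/formatter.py | _format_embeds
-- ===== SOURCE A (Python) =====
-- def _format_embeds(embeds: list) -> str:
--     """Format simplified embeds as inline text."""
--     parts = []
--     for emb in embeds:
--         title = emb.get("title", "")
--         url = emb.get("url", "")
--         if title and url:
--             parts.append(f"[embed: {title} - {url}]")
--         elif title:
--             parts.append(f"[embed: {title}]")
--         elif url:
--             parts.append(f"[embed: {url}]")
--     return "\n".join(parts)
-- ===== SOURCE B (Python) =====
-- def _format_embeds(embeds: list) -> str:
--     """Format simplified embeds as inline text."""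
--     if not embeds:
--         return ""
--     emb = embeds[0]
--     tail = _format_embeds(embeds[1:])
--     title = emb.get("title", "")
--     url = emb.get("url", "")
--     if not title and not url:
--         return tail
--     sep = " - " if title and url else ""
--     line = "[embed: " + title + sep + url + "]"
--     return line if not tail else line + "\n" + tail
-- ===== Notes on version B (the rewrite author's own statement) =====
-- stated objective: alternative
-- what changed: Replaces A's accumulate-lines-then-'\n'.join loop by direct structural recursion: each embed's line is built with a computed separator (' - ' only when both fields are present, plain concatenation otherwise covers the one-field cases) and stitched onto the recursively formatted tail string, with no intermediate list and no join.
import Mathlib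
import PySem

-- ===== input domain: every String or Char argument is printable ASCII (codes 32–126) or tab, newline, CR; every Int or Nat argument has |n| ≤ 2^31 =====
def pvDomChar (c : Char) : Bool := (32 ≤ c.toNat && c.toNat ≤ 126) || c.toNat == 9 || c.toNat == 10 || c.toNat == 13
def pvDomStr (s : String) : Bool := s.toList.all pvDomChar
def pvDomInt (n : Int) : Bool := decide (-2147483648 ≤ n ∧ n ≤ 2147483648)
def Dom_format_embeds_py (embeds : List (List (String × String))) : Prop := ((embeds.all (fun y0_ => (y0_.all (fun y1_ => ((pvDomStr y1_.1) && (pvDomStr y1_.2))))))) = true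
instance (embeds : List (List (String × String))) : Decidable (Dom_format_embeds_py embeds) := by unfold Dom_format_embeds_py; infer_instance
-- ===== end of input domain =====

-- B replaces A's accumulate-then-join loop by direct recursion on the list: it formats the head
-- with a computed separator (" - " only when both fields are present, so the concatenation covers
-- all three of A's branches) and stitches the head line onto the recursively built tail string,
-- with no intermediate list and no join (objective: alternative decomposition).

-- ===== PORT A =====
def format_embeds_py (embeds : List (List (String × String))) : String :=
  let parts := embeds.foldl (fun parts emb =>
    let title := (PySem.Dict.ofList emb).getD "title" ""
    let url := (PySem.Dict.ofList emb).getD "url" ""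
    if title ≠ "" ∧ url ≠ "" then parts ++ ["[embed: " ++ title ++ " - " ++ url ++ "]"]
    else if title ≠ "" then parts ++ ["[embed: " ++ title ++ "]"]
    else if url ≠ "" then parts ++ ["[embed: " ++ url ++ "]"]
    else parts) []
  PySem.Str.join "\n" parts

-- ===== PORT B =====
def format_embeds_py_alt : List (List (String × String)) → String
  | [] => ""
  | emb :: rest =>
    let tail := format_embeds_py_alt rest
    let title := (PySem.Dict.ofList emb).getD "title" ""
    let url := (PySem.Dict.ofList emb).getD "url" ""
    if title = "" ∧ url = "" then tail
    else
      let sep := if title ≠ "" ∧ url ≠ "" then " - " else ""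
      let line := "[embed: " ++ title ++ sep ++ url ++ "]"
      if tail = "" then line else line ++ "\n" ++ tail

-- ===== PRECONDITION & SPEC =====
def Spec_format_embeds_py (embeds : List (List (String × String))) (out : String) : Prop := out = format_embeds_py_alt embeds
instance (embeds : List (List (String × String))) (out : String) : Decidable (Spec_format_embeds_py embeds out) := by unfold Spec_format_embeds_py; infer_instance

-- ===== CLAIM (what is proved, stated in full; the proofs are below) =====
def Claim_equal_format_embeds_py : Prop := ∀ (embeds : List (List (String × String))), Dom_format_embeds_py embeds → Spec_format_embeds_py embeds (format_embeds_py embeds)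

-- ===== LEMMAS AND PROOFS =====

-- the (zero- or one-element) list of lines A's loop appends for a single embed
def pvLine (emb : List (String × String)) : List String :=
  let title := (PySem.Dict.ofList emb).getD "title" ""
  let url := (PySem.Dict.ofList emb).getD "url" ""
  if title ≠ "" ∧ url ≠ "" then ["[embed: " ++ title ++ " - " ++ url ++ "]"]
  else if title ≠ "" then ["[embed: " ++ title ++ "]"]
  else if url ≠ "" then ["[embed: " ++ url ++ "]"]
  else []

theorem pvLine_ne_empty (emb : List (String × String)) (s : String) (hs : s ∈ pvLine emb) : s ≠ "" := by
  unfold pvLine at hs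
  simp only at hs
  split_ifs at hs <;> simp at hs <;>
    (subst hs; intro h; have := congrArg String.toList h; simp at this)

theorem flatMap_pvLine_ne_empty (l : List (List (String × String))) (s : String)
    (hs : s ∈ l.flatMap pvLine) : s ≠ "" := by
  rcases List.mem_flatMap.mp hs with ⟨emb, _, hmem⟩
  exact pvLine_ne_empty emb s hmem

theorem join_ne_empty (ls : List String) (hne : ls ≠ [])
    (h : ∀ s ∈ ls, s ≠ "") : PySem.Str.join "\n" ls ≠ "" := by
  rcases ls with _ | ⟨x, t⟩
  · exact absurd rfl hne
  · have hx : x ≠ "" := h x (by simp)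
    intro hj
    have := congrArg String.toList hj
    rcases t with _ | ⟨y, t'⟩
    · simp [PySem.Str.join, PySem.Chars.join, List.intercalate] at this
      exact hx (String.toList_injective (by simpa using this))
    · simp [PySem.Str.join, PySem.Chars.join, List.intercalate] at this

theorem alt_eq_join (l : List (List (String × String))) :
    format_embeds_py_alt l = PySem.Str.join "\n" (l.flatMap pvLine) := by
  induction l with
  | nil => simp [format_embeds_py_alt, PySem.Str.join, PySem.Chars.join, List.intercalate]
  | cons emb rest ih =>
    unfold format_embeds_py_alt
    simp only [List.flatMap_cons, ih]
    by_cases ht : (PySem.Dict.ofList emb).getD "title" "" = "" <;>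
      by_cases hu : (PySem.Dict.ofList emb).getD "url" "" = ""
    · simp [pvLine, ht, hu]
    all_goals (
      simp only [pvLine]
      rcases hflat : rest.flatMap pvLine with _ | ⟨z, zs⟩
      · apply String.toList_injective
        simp [ht, hu, PySem.Str.join, PySem.Chars.join, List.intercalate]
      · have hne : PySem.Str.join "\n" (z :: zs) ≠ "" := by
          rw [← hflat]
          exact join_ne_empty _ (by simp [hflat]) (flatMap_pvLine_ne_empty rest)
        rw [if_neg hne]
        apply String.toList_injective
        simp [ht, hu, PySem.Str.join, PySem.Chars.join, List.intercalate])

-- ===== VERDICT (by name: the statement is the Claim_ definition above) =====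
theorem format_embeds_py_spec : Claim_equal_format_embeds_py := by
  intro embeds _
  unfold Spec_format_embeds_py format_embeds_py
  have hf : (fun (parts : List String) (emb : List (String × String)) =>
      let title := (PySem.Dict.ofList emb).getD "title" ""
      let url := (PySem.Dict.ofList emb).getD "url" ""
      if title ≠ "" ∧ url ≠ "" then parts ++ ["[embed: " ++ title ++ " - " ++ url ++ "]"]
      else if title ≠ "" then parts ++ ["[embed: " ++ title ++ "]"]
      else if url ≠ "" then parts ++ ["[embed: " ++ url ++ "]"]
      else parts)
    = (fun (parts : List String) (emb : List (String × String)) => parts ++ pvLine emb) := by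
    funext acc emb
    simp only [pvLine]
    split_ifs <;> simp
  rw [hf, PySem.List.foldl_append_eq_flatMap, alt_eq_join]
  simp
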